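-- pv_equiv track=rewrite | github.com/Shams2611/Grokking-algorithm | BreadthFirstSearch/bfs_levels.py | bfs_levels
-- ===== SOURCE A (Python) =====
-- from collections import deque
--
-- def bfs_levels(graph, start):
--     levels = []
--     queue = deque([start])
--     seen = {start}
--
--     while queue:
--         level_size = len(queue)
--         current_level = []
--
--         for _ in range(level_size):
--             node = queue.popleft()
--             current_level.append(node)
--
--             for neighbor in graph.get(node, []):
--                 if neighbor not in seen:
--                     seen.add(neighbor)
--                     queue.append(neighbor)
--
--         levels.append(current_level)
--
--     return levels
-- ===== SOURCE B (Python) =====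
-- def bfs_levels(graph, start):
--     levels = []
--     seen = {start}
--     current = [start]
--     while current:
--         levels.append(current)
--         next_level = []
--         for node in current:
--             for neighbor in graph.get(node, []):
--                 if neighbor not in seen:
--                     seen.add(neighbor)
--                     next_level.append(neighbor)
--         current = next_level
--     return levels
-- ===== Notes on version B (the rewrite author's own statement) =====
-- stated objective: simpler
-- what changed: Replaces the deque with popleft/level_size batching by a two-frontier loop: the current level is a plain list that is appended whole to levels, and the next frontier is built directly, so the queue and the range(level_size) bookkeeping disappear.
import Mathlib
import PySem

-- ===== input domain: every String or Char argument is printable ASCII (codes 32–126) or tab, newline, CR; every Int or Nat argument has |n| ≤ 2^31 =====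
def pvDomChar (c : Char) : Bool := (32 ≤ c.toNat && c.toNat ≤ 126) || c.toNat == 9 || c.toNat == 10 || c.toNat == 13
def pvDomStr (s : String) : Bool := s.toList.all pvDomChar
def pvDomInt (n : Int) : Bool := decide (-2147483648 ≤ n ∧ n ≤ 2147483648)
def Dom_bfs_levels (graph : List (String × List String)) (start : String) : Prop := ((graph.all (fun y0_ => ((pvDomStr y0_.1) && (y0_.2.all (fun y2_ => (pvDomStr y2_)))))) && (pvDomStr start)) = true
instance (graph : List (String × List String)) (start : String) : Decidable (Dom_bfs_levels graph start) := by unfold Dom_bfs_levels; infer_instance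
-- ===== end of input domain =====

-- B replaces A's deque+level_size batching by a two-frontier loop (simpler; same cost).
-- Both ports use the same fuel bound (2 + total neighbour count ≥ number of BFS levels),
-- a totality guard only: the while-loops run at most that many iterations.
def pvFuel (graph : List (String × List String)) : Nat :=
  2 + graph.foldl (fun a p => a + p.2.length) 0

-- ===== PORT A =====
-- for neighbor in graph.get(node, []): if neighbor not in seen: seen.add; queue.append
def pvA_nb (nbs : List String) (st : PySem.Set String × List String) :
    PySem.Set String × List String :=
  nbs.foldl (fun p nb =>
    if PySem.Set.contains p.1 nb then p else (PySem.Set.add p.1 nb, p.2 ++ [nb])) st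

-- for _ in range(level_size): node = queue.popleft(); current_level.append(node); …
def pvA_inner (graph : List (String × List String)) :
    Nat → List String → PySem.Set String → List String →
    List String × PySem.Set String × List String
  | 0, queue, seen, cur => (queue, seen, cur)
  | _ + 1, [], seen, cur => ([], seen, cur)   -- unreachable: level_size = len(queue)
  | k + 1, node :: queue, seen, cur =>
      let st := pvA_nb (PySem.Dict.getD (PySem.Dict.mk graph) node []) (seen, queue)
      pvA_inner graph k st.2 st.1 (cur ++ [node])

-- while queue: …; levels.append(current_level)
def pvA_outer (graph : List (String × List String)) :
    Nat → List String → PySem.Set String → List (List String) → List (List String)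
  | 0, _, _, levels => levels
  | f + 1, queue, seen, levels =>
      if queue.isEmpty then levels
      else
        let r := pvA_inner graph queue.length queue seen []
        pvA_outer graph f r.1 r.2.1 (levels ++ [r.2.2])

def bfs_levels (graph : List (String × List String)) (start : String) : List (List String) :=
  pvA_outer graph (pvFuel graph) [start] (PySem.Set.ofList [start]) []

-- ===== PORT B =====
-- for neighbor in graph.get(node, []): if neighbor not in seen: seen.add; next_level.append
def pvB_nb (nbs : List String) (st : PySem.Set String × List String) :
    PySem.Set String × List String :=
  nbs.foldl (fun p nb =>
    if PySem.Set.contains p.1 nb then p else (PySem.Set.add p.1 nb, p.2 ++ [nb])) st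

-- for node in current: …  (threads (seen, next_level))
def pvB_step (graph : List (String × List String)) (cur : List String)
    (st : PySem.Set String × List String) : PySem.Set String × List String :=
  cur.foldl (fun p node => pvB_nb (PySem.Dict.getD (PySem.Dict.mk graph) node []) p) st

-- while current: levels.append(current); current = next_level
def pvB_go (graph : List (String × List String)) :
    Nat → List String → PySem.Set String → List (List String)
  | 0, _, _ => []
  | f + 1, cur, seen =>
      if cur.isEmpty then []
      else
        let r := pvB_step graph cur (seen, [])
        cur :: pvB_go graph f r.2 r.1

def bfs_levels_alt (graph : List (String × List String)) (start : String) : List (List String) :=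
  pvB_go graph (pvFuel graph) [start] (PySem.Set.ofList [start])

-- ===== PRECONDITION & SPEC =====
def Spec_bfs_levels (graph : List (String × List String)) (start : String) (out : List (List String)) : Prop := out = bfs_levels_alt graph start
instance (graph : List (String × List String)) (start : String) (out : List (List String)) : Decidable (Spec_bfs_levels graph start out) := by unfold Spec_bfs_levels; infer_instance

-- ===== CLAIM (what is proved, stated in full; the proofs are below) =====
def Claim_equal_bfs_levels : Prop := ∀ (graph : List (String × List String)) (start : String), Dom_bfs_levels graph start → Spec_bfs_levels graph start (bfs_levels graph start)

-- ===== LEMMAS AND PROOFS =====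

theorem pvA_nb_eq_pvB_nb (nbs : List String) (st : PySem.Set String × List String) :
    pvA_nb nbs st = pvB_nb nbs st := rfl

-- A appends new neighbours to the back of the queue; the yet-unpopped prefix is untouched.
theorem pvB_nb_prefix (nbs : List String) (seen : PySem.Set String)
    (pre q : List String) :
    pvB_nb nbs (seen, pre ++ q) =
      ((pvB_nb nbs (seen, q)).1, pre ++ (pvB_nb nbs (seen, q)).2) := by
  induction nbs generalizing seen q with
  | nil => simp [pvB_nb]
  | cons nb rest ih =>
      by_cases h : nb ∈ seen
      · simpa [pvB_nb, h] using ih seen q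
      · simpa [pvB_nb, h] using ih (PySem.Set.add seen nb) (q ++ [nb])

-- Popping level_size = |cur| nodes off the queue cur ++ added yields exactly the level cur
-- and the next frontier computed B-style.
theorem pvA_inner_eq (graph : List (String × List String)) (cur : List String) :
    ∀ (added : List String) (seen : PySem.Set String) (lvl : List String),
    pvA_inner graph cur.length (cur ++ added) seen lvl =
      ((pvB_step graph cur (seen, added)).2, (pvB_step graph cur (seen, added)).1,
        lvl ++ cur) := by
  induction cur with
  | nil => intro added seen lvl; simp [pvA_inner, pvB_step]
  | cons c cs ih =>
      intro added seen lvl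
      simp only [List.length_cons, List.cons_append, pvA_inner, pvA_nb_eq_pvB_nb]
      rw [pvB_nb_prefix]
      have := ih (pvB_nb (PySem.Dict.getD (PySem.Dict.mk graph) c []) (seen, added)).2
        (pvB_nb (PySem.Dict.getD (PySem.Dict.mk graph) c []) (seen, added)).1 (lvl ++ [c])
      simp only [this, pvB_step, List.foldl_cons]
      simp

theorem pvA_outer_eq (graph : List (String × List String)) :
    ∀ (f : Nat) (queue : List String) (seen : PySem.Set String)
      (levels : List (List String)),
    pvA_outer graph f queue seen levels = levels ++ pvB_go graph f queue seen := by
  intro f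
  induction f with
  | zero => intro queue seen levels; simp [pvA_outer, pvB_go]
  | succ f ih =>
      intro queue seen levels
      by_cases h : queue.isEmpty
      · simp [pvA_outer, pvB_go, h]
      · simp only [pvA_outer, pvB_go, h, Bool.false_eq_true, ite_false]
        have hq : queue ++ ([] : List String) = queue := by simp
        rw [show pvA_inner graph queue.length queue seen [] =
              pvA_inner graph queue.length (queue ++ []) seen [] by rw [hq]]
        rw [pvA_inner_eq]
        simp [ih]

-- ===== VERDICT (by name: the statement is the Claim_ definition above) =====
theorem bfs_levels_spec : Claim_equal_bfs_levels := by
  intro graph start _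
  unfold Spec_bfs_levels bfs_levels bfs_levels_alt
  rw [pvA_outer_eq]
  simp
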